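-- pv_equiv track=rewrite | github.com/chaseltb/url-combinatorics | backend/main.py | generate_url_combinations
-- ===== SOURCE A (Python) =====
-- from typing import List
-- from itertools import product
--
-- def generate_url_combinations(url: str) -> List[str]:
--     swap_map = {
--         'l': ['l', 'I'],
--         'I': ['I', 'l'],
--         '0': ['0', 'O'],
--         'O': ['O', '0'],
--         '1': ['1', 'l']
--     }
--
--     positions = [(i, swap_map[c]) for i, c in enumerate(url) if c in swap_map]
--     if not positions:
--         return []
--
--     combinations = []
--     for replacements in product(*[p[1] for p in positions]):
--         temp = list(url)
--         for (i, _), char in zip(positions, replacements):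
--             temp[i] = char
--         combinations.append(''.join(temp))
--     return combinations
-- ===== SOURCE B (Python) =====
-- def generate_url_combinations(url: str):
--     swap_map = {
--         'l': ['l', 'I'],
--         'I': ['I', 'l'],
--         '0': ['0', 'O'],
--         'O': ['O', '0'],
--         '1': ['1', 'l']
--     }
--     results = ['']
--     found = False
--     for c in url:
--         if c in swap_map:
--             results = [r + o for r in results for o in swap_map[c]]
--             found = True
--         else:
--             results = [r + c for r in results]
--     return results if found else []
-- ===== Notes on version B (the rewrite author's own statement) =====
-- stated objective: simpler
-- what changed: Replaces the position-list + itertools.product + per-tuple list-mutation pipeline with a single left-to-right pass that extends a list of prefixes, branching per character; a found flag reproduces the empty result when no swappable character occurs.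
import Mathlib
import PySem

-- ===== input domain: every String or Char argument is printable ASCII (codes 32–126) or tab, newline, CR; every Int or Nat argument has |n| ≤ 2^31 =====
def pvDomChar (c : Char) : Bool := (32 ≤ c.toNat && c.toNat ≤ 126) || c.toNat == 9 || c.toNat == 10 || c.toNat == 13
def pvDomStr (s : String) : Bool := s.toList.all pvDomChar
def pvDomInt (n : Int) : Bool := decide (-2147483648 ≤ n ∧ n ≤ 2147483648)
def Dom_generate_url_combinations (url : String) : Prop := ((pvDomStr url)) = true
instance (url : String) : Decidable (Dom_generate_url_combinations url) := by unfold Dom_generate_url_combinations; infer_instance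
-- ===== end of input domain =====

-- B builds the combinations in one left-to-right pass extending prefixes, instead of
-- A's position list + itertools.product + per-tuple mutation; objective: simpler.
-- Both ports work over List Char (Python str concatenation/join ↔ list append, String.mk at the end).

-- ===== PORT A =====
-- shared swap_map literal (the same dict literal appears in both Pythons)
def swapOf (c : Char) : Option (List Char) :=
  if c = 'l' then some ['l', 'I']
  else if c = 'I' then some ['I', 'l']
  else if c = '0' then some ['0', 'O']
  else if c = 'O' then some ['O', '0']
  else if c = '1' then some ['1', 'l']
  else none

-- positions = [(i, swap_map[c]) for i, c in enumerate(url) if c in swap_map]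
def posnsA (i : Nat) : List Char → List (Nat × List Char)
  | [] => []
  | c :: s =>
    match swapOf c with
    | some o => (i, o) :: posnsA (i + 1) s
    | none => posnsA (i + 1) s

-- itertools.product(*lists): first factor varies slowest
def prodA : List (List Char) → List (List Char)
  | [] => [[]]
  | xs :: rest => xs.flatMap (fun x => (prodA rest).map (fun t => x :: t))

-- the inner loop: for (i, _), char in zip(positions, replacements): temp[i] = char
-- (List.set is exact here: every stored index is in range of temp)
def applyReplA (temp : List Char) (zipped : List ((Nat × List Char) × Char)) : List Char :=
  zipped.foldl (fun t p => t.set p.1.1 p.2) temp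

def generate_url_combinations (url : String) : List String :=
  let positions := posnsA 0 url.toList
  if positions = [] then []
  else (prodA (positions.map Prod.snd)).map
    (fun repl => String.mk (applyReplA url.toList (positions.zip repl)))

-- ===== PORT B =====
-- one loop step of B: extend every prefix by the options of c (or by c itself)
def stepB (acc : List (List Char) × Bool) (c : Char) : List (List Char) × Bool :=
  match swapOf c with
  | some opts => (acc.1.flatMap (fun r => opts.map (fun o => r ++ [o])), true)
  | none => (acc.1.map (fun r => r ++ [c]), acc.2)

def generate_url_combinations_alt (url : String) : List String :=
  let st := url.toList.foldl stepB ([[]], false)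
  if st.2 then st.1.map String.mk else []

-- ===== PRECONDITION & SPEC =====
def Spec_generate_url_combinations (url : String) (out : List String) : Prop := out = generate_url_combinations_alt url
instance (url : String) (out : List String) : Decidable (Spec_generate_url_combinations url out) := by unfold Spec_generate_url_combinations; infer_instance

-- ===== CLAIM (what is proved, stated in full; the proofs are below) =====
def Claim_equal_generate_url_combinations : Prop := ∀ (url : String), Dom_generate_url_combinations url → Spec_generate_url_combinations url (generate_url_combinations url)

-- ===== LEMMAS AND PROOFS =====

-- the common reference function: all combinations of s, product order
def gRef : List Char → List (List Char)
  | [] => [[]]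
  | c :: s =>
    match swapOf c with
    | some o => o.flatMap (fun x => (gRef s).map (fun t => x :: t))
    | none => (gRef s).map (fun t => c :: t)

def hasSwap (s : List Char) : Bool := s.any (fun c => (swapOf c).isSome)

theorem posnsA_shift (s : List Char) : ∀ i : Nat,
    posnsA (i + 1) s = (posnsA i s).map (fun p => (p.1 + 1, p.2)) := by
  induction s with
  | nil => intro i; simp [posnsA]
  | cons c s ih =>
    intro i
    cases h : swapOf c <;> simp [posnsA, h, ih (i + 1)]

theorem posnsA_nil_iff (s : List Char) : ∀ i : Nat,
    posnsA i s = [] ↔ hasSwap s = false := by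
  induction s with
  | nil => intro i; simp [posnsA, hasSwap]
  | cons c s ih =>
    intro i
    cases h : swapOf c <;> simp [posnsA, h, hasSwap, ih (i + 1)]

theorem applyReplA_shift (zipped : List ((Nat × List Char) × Char)) :
    ∀ (t : List Char) (x : Char),
    applyReplA (x :: t) (zipped.map (fun q => ((q.1.1 + 1, q.1.2), q.2))) =
      x :: applyReplA t zipped := by
  induction zipped with
  | nil => intro t x; simp [applyReplA]
  | cons q zs ih =>
    intro t x
    simp [applyReplA, List.foldl_cons] at ih ⊢
    exact ih (t.set q.1.1 q.2) x

theorem mainA (s : List Char) :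
    (prodA ((posnsA 0 s).map Prod.snd)).map
      (fun repl => applyReplA s ((posnsA 0 s).zip repl)) = gRef s := by
  induction s with
  | nil => simp [posnsA, prodA, applyReplA, gRef]
  | cons c s ih =>
    cases h : swapOf c with
    | none =>
      have hz : ∀ repl : List Char,
          ((posnsA 0 s).map (fun p => (p.1 + 1, p.2))).zip repl =
            ((posnsA 0 s).zip repl).map (fun q => ((q.1.1 + 1, q.1.2), q.2)) := by
        intro repl
        simp [List.zip_map_left]
      simp only [posnsA, h, posnsA_shift s 0, gRef]
      rw [show ((posnsA 0 s).map (fun p => (p.1 + 1, p.2))).map Prod.snd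
            = (posnsA 0 s).map Prod.snd by simp [List.map_map]]
      rw [show (fun repl => applyReplA (c :: s)
              (((posnsA 0 s).map (fun p => (p.1 + 1, p.2))).zip repl))
            = (fun repl => c :: applyReplA s ((posnsA 0 s).zip repl)) by
        funext repl; rw [hz repl, applyReplA_shift]]
      rw [← ih, List.map_map]
      rfl
    | some o =>
      have hz : ∀ repl : List Char,
          ((posnsA 0 s).map (fun p => (p.1 + 1, p.2))).zip repl =
            ((posnsA 0 s).zip repl).map (fun q => ((q.1.1 + 1, q.1.2), q.2)) := by
        intro repl
        simp [List.zip_map_left]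
      simp only [posnsA, h, posnsA_shift s 0, gRef]
      simp only [List.map_cons, prodA, List.map_flatMap, List.map_map]
      refine List.flatMap_congr (fun x hx => ?_)
      rw [← ih, List.map_map]
      refine List.map_congr_left (fun repl hrepl => ?_)
      simp only [Function.comp, List.zip_cons_cons, applyReplA, List.foldl_cons, List.set]
      rw [hz repl]
      exact applyReplA_shift ((posnsA 0 s).zip repl) s x

theorem foldB (s : List Char) :
    ∀ (rs : List (List Char)) (b : Bool),
    s.foldl stepB (rs, b) =
      (rs.flatMap (fun r => (gRef s).map (fun t => r ++ t)), b || hasSwap s) := by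
  induction s with
  | nil => intro rs b; simp [gRef, hasSwap]
  | cons c s ih =>
    intro rs b
    cases h : swapOf c with
    | none =>
      simp only [List.foldl_cons, stepB, ih, gRef, hasSwap, List.any_cons, h,
        Option.isSome_none, Bool.false_or]
      rw [Prod.mk.injEq]
      refine ⟨?_, rfl⟩
      simp [List.flatMap_map, List.map_map, Function.comp_def, List.append_assoc]
    | some o =>
      simp only [List.foldl_cons, stepB, ih, gRef, hasSwap, List.any_cons, h,
        Option.isSome_some, Bool.true_or, Bool.or_true]
      rw [Prod.mk.injEq]
      refine ⟨?_, rfl⟩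
      simp [List.flatMap_map, List.map_flatMap, List.flatMap_assoc, List.map_map,
        Function.comp_def, List.append_assoc]

-- ===== VERDICT (by name: the statement is the Claim_ definition above) =====
theorem generate_url_combinations_spec : Claim_equal_generate_url_combinations := by
  intro url _
  unfold Spec_generate_url_combinations generate_url_combinations generate_url_combinations_alt
  rw [foldB]
  by_cases hs : hasSwap url.toList = true
  · have hne : posnsA 0 url.toList ≠ [] := by
      intro h0; rw [posnsA_nil_iff] at h0; simp [hs] at h0
    simp only [hs, hne, if_false, Bool.false_or, if_pos]
    rw [show (fun repl => String.mk (applyReplA url.toList ((posnsA 0 url.toList).zip repl)))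
          = (String.mk ∘ fun repl => applyReplA url.toList ((posnsA 0 url.toList).zip repl))
        from rfl, ← List.map_map, mainA]
    simp
  · have h0 : posnsA 0 url.toList = [] := by
      rw [posnsA_nil_iff]; simpa using hs
    have hs' : hasSwap url.toList = false := by simpa using hs
    simp [h0, hs']
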